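-- pv_equiv track=rewrite | github.com/codybartfast/aoc-2015-py | day15.py | recipes
-- ===== SOURCE A (Python) =====
-- def add_ingredient(properties, ingredient, spoons):
--     return [
--         properties[idx] + spoons * ingredient[idx] for idx in range(len(properties))
--     ]
--
-- def recipes(properties, ingredients, remaining_spoons):
--     if len(ingredients) == 1:
--         yield add_ingredient(properties, ingredients[0], remaining_spoons)
--     else:
--         for spoons in range(remaining_spoons + 1):
--             yield from recipes(
--                 add_ingredient(properties, ingredients[0], spoons),
--                 ingredients[1:],
--                 remaining_spoons - spoons,
--             )
-- ===== SOURCE B (Python) =====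
-- def recipes(properties, ingredients, remaining_spoons):
--     # Iterative level-by-level expansion: thread a worklist of (partial
--     # properties, remaining budget) states across the ingredients instead of
--     # recursing depth-first.
--     states = [(properties, remaining_spoons)]
--     for ing in ingredients[:-1]:
--         states = [
--             ([p + s * q for p, q in zip(props, ing)], rem - s)
--             for props, rem in states
--             for s in range(rem + 1)
--         ]
--     last = ingredients[-1]
--     for props, rem in states:
--         yield [p + rem * q for p, q in zip(props, last)]
-- ===== Notes on version B (the rewrite author's own statement) =====
-- stated objective: alternative
-- what changed: Replaces the depth-first recursion threading one accumulator with an iterative level-by-level expansion: a worklist of (partial-properties, remaining-budget) states is rebuilt once per ingredient, and the last ingredient is applied in a final pass.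
-- outside the precondition, e.g. on recipes([], [], -1): A returns [], B raises IndexError
import Mathlib
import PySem

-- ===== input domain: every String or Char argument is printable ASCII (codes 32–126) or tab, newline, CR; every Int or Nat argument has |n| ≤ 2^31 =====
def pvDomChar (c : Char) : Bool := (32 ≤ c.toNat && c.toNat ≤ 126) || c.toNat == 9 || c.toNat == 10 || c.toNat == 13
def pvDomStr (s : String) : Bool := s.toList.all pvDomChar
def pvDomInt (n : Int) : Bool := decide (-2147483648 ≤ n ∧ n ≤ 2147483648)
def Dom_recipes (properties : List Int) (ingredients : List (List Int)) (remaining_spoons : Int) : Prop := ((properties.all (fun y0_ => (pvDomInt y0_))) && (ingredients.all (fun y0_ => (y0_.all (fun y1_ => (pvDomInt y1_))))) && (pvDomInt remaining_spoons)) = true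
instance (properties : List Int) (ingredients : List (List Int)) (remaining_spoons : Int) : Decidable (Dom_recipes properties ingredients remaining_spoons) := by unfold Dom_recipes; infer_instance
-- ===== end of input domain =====

-- B replaces A's depth-first recursion with an iterative level-by-level worklist of
-- (partial properties, remaining budget) states; same cost, different decomposition.


-- ===== PORT A =====
def add_ingredient (properties ingredient : List Int) (spoons : Int) : List Int :=
  (PySem.List.pyRange 0 (properties.length : Int) 1).map
    (fun idx => PySem.List.pyGetD properties idx 0 + spoons * PySem.List.pyGetD ingredient idx 0)

-- the generator's full yield sequence as a list; on ingredients = [] Python raises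
-- IndexError when 0 ≤ remaining_spoons (excluded by Pre_) and yields nothing otherwise
def recipes (properties : List Int) (ingredients : List (List Int)) (remaining_spoons : Int) : List (List Int) :=
  match ingredients with
  | [] => []
  | [ing] => [add_ingredient properties ing remaining_spoons]
  | ing :: rest =>
      (PySem.List.pyRange 0 (remaining_spoons + 1) 1).flatMap
        (fun spoons => recipes (add_ingredient properties ing spoons) rest (remaining_spoons - spoons))

-- ===== PORT B =====
-- one pass of the worklist: spend 0..rem spoons of one ingredient on every state
def stepB (states : List (List Int × Int)) (ing : List Int) : List (List Int × Int) :=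
  states.flatMap (fun pr =>
    (PySem.List.pyRange 0 (pr.2 + 1) 1).map
      (fun s => (List.zipWith (fun p q => p + s * q) pr.1 ing, pr.2 - s)))

def recipes_alt (properties : List Int) (ingredients : List (List Int)) (remaining_spoons : Int) : List (List Int) :=
  let states := ingredients.dropLast.foldl stepB [(properties, remaining_spoons)]
  let last := ingredients.getLast?.getD []
  states.map (fun pr => List.zipWith (fun p q => p + pr.2 * q) pr.1 last)

-- ===== PRECONDITION & SPEC =====
-- Pre_ excludes empty ingredient lists and too-short ingredients (shorter than
-- properties) wherever A's generator reaches them: there Python A raises IndexError,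
-- except the single corner ingredients = [] with remaining_spoons < 0, where A's lazy
-- generator yields nothing but B still evaluates ingredients[-1] and raises.
def Pre_recipes (properties : List Int) (ingredients : List (List Int)) (remaining_spoons : Int) : Prop :=
  ingredients ≠ [] ∧
    ((ingredients.length = 1 ∨ 0 ≤ remaining_spoons) →
      ∀ ing ∈ ingredients, properties.length ≤ ing.length)
instance (properties : List Int) (ingredients : List (List Int)) (remaining_spoons : Int) : Decidable (Pre_recipes properties ingredients remaining_spoons) := by unfold Pre_recipes; infer_instance

def pvWitness_recipes : List Int × List (List Int) × Int := ([1, 2], [[1, 1], [2, 0]], 3)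

def Spec_recipes (properties : List Int) (ingredients : List (List Int)) (remaining_spoons : Int) (out : List (List Int)) : Prop := out = recipes_alt properties ingredients remaining_spoons
instance (properties : List Int) (ingredients : List (List Int)) (remaining_spoons : Int) (out : List (List Int)) : Decidable (Spec_recipes properties ingredients remaining_spoons out) := by unfold Spec_recipes; infer_instance

-- ===== CLAIM (what is proved, stated in full; the proofs are below) =====
def Claim_equal_recipes : Prop := ∀ (properties : List Int) (ingredients : List (List Int)) (remaining_spoons : Int), Dom_recipes properties ingredients remaining_spoons → Pre_recipes properties ingredients remaining_spoons → Spec_recipes properties ingredients remaining_spoons (recipes properties ingredients remaining_spoons)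

-- ===== LEMMAS AND PROOFS =====

theorem zip_eq_add (props ing : List Int) (s : Int)
    (h : props.length ≤ ing.length) :
    List.zipWith (fun p q => p + s * q) props ing = add_ingredient props ing s := by
  apply List.ext_getElem
  · simp [add_ingredient, PySem.List.length_pyRange_one]
    omega
  · intro i h1 h2
    have hi : i < props.length := by simp at h1; exact h1.1
    simp only [add_ingredient, List.getElem_map, PySem.List.getElem_pyRange_one,
      List.getElem_zipWith, zero_add, PySem.List.pyGetD_natCast, List.getD,
      List.getElem?_eq_getElem hi, List.getElem?_eq_getElem (by omega : i < ing.length),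
      Option.getD_some]

theorem length_zip_step (props ing : List Int) (s : Int)
    (h : props.length ≤ ing.length) :
    (List.zipWith (fun p q => p + s * q) props ing).length = props.length := by
  simp; omega

theorem flatMap_congr' {α β : Type} (l : List α) (f g : α → List β)
    (h : ∀ a ∈ l, f a = g a) : l.flatMap f = l.flatMap g := by
  induction l with
  | nil => rfl
  | cons x xs ih =>
      simp only [List.flatMap_cons, h x (by simp), ih (fun a ha => h a (by simp [ha]))]

theorem recipes_cons (p ing x : List Int) (xs : List (List Int)) (r : Int) :
    recipes p (ing :: x :: xs) r =
      (PySem.List.pyRange 0 (r + 1) 1).flatMap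
        (fun s => recipes (add_ingredient p ing s) (x :: xs) (r - s)) := by
  rfl

theorem stepB_inv (ings : List (List Int)) (last : List Int) (L : Nat) :
    ∀ (states : List (List Int × Int)),
    (∀ pr ∈ states, pr.1.length = L) →
    (∀ ing ∈ ings, L ≤ ing.length) → L ≤ last.length →
    (ings.foldl stepB states).map
        (fun pr => List.zipWith (fun p q => p + pr.2 * q) pr.1 last)
      = states.flatMap (fun pr => recipes pr.1 (ings ++ [last]) pr.2) := by
  induction ings with
  | nil =>
      intro states hs _ hl
      simp only [List.foldl_nil, List.nil_append]
      calc states.map (fun pr => List.zipWith (fun p q => p + pr.2 * q) pr.1 last)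
          = states.map (fun pr => add_ingredient pr.1 last pr.2) :=
            List.map_congr_left (fun pr hpr => zip_eq_add _ _ _ (by rw [hs pr hpr]; exact hl))
        _ = states.flatMap (fun pr => [add_ingredient pr.1 last pr.2]) :=
            List.map_eq_flatMap
        _ = states.flatMap (fun pr => recipes pr.1 [last] pr.2) :=
            flatMap_congr' _ _ _ (fun pr _ => rfl)
  | cons ing rest ih =>
      intro states hs hi hl
      have hing : L ≤ ing.length := hi ing (by simp)
      have hrest : ∀ i ∈ rest, L ≤ i.length := fun i hi' => hi i (by simp [hi'])
      have hs' : ∀ pr ∈ stepB states ing, pr.1.length = L := by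
        intro pr hpr
        simp only [stepB, List.mem_flatMap, List.mem_map] at hpr
        obtain ⟨q, hq, s, _, rfl⟩ := hpr
        exact length_zip_step _ _ _ (hs q hq ▸ hing) ▸ hs q hq
      rw [List.foldl_cons, ih (stepB states ing) hs' hrest hl]
      simp only [stepB]
      rw [List.flatMap_assoc]
      apply flatMap_congr'
      intro pr hpr
      simp only [List.flatMap_map]
      cases h : rest ++ [last] with
      | nil => exact absurd h (by simp)
      | cons x xs =>
          rw [List.cons_append, h, recipes_cons]
          apply flatMap_congr'
          intro s _
          rw [zip_eq_add _ _ _ (by rw [hs pr hpr]; exact hing)]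

theorem foldl_stepB_nil (l : List (List Int)) :
    l.foldl stepB [] = [] := by
  induction l with
  | nil => rfl
  | cons x xs ih => simpa [stepB] using ih

-- ===== VERDICT (by name: the statement is the Claim_ definition above) =====
theorem recipes_spec : Claim_equal_recipes := by
  intro props ings r _ hpre
  obtain ⟨hne, hlen⟩ := hpre
  unfold Spec_recipes recipes_alt
  by_cases hc : ings.length = 1 ∨ 0 ≤ r
  · have hall := hlen hc
    have hlast : ings.getLast?.getD [] = ings.getLast hne := by
      simp [List.getLast?_eq_some_getLast hne]
    rw [hlast,
      stepB_inv ings.dropLast (ings.getLast hne) props.length [(props, r)]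
        (by simp)
        (fun i hi => hall i (List.mem_of_mem_dropLast hi))
        (hall _ (List.getLast_mem hne)),
      List.dropLast_append_getLast hne]
    simp
  · have h1 : ings.length ≠ 1 := fun h => hc (Or.inl h)
    have h2 : r < 0 := lt_of_not_ge fun h => hc (Or.inr h)
    match ings with
    | [] => exact absurd rfl hne
    | [i] => exact absurd rfl h1
    | a :: b :: t =>
        rw [recipes_cons, PySem.List.pyRange_one_eq_nil (by omega)]
        simp only [List.flatMap_nil]
        rw [show (a :: b :: t).dropLast = a :: (b :: t).dropLast from rfl,
          List.foldl_cons,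
          show stepB [(props, r)] a = [] by
            simp [stepB, PySem.List.pyRange_one_eq_nil (by omega : r + 1 ≤ 0)],
          foldl_stepB_nil]
        rfl
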